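-- pv_equiv track=rewrite | github.com/Arescoreadmin/fg-core | tools/testing/harness/lane_runner.py | _sanitize_log
-- ===== SOURCE A (Python) =====
-- def _sanitize_log(text: str) -> str:
--     redaction_tokens = ["FG_API_KEY", "POSTGRES_PASSWORD", "NATS_AUTH_TOKEN", "FG_WEBHOOK_SECRET"]
--     lines: list[str] = []
--     for line in text.splitlines():
--         sanitized = line
--         for token in redaction_tokens:
--             if token in sanitized:
--                 sanitized = sanitized.replace(token, f"{token}=<redacted>")
--         lines.append(sanitized)
--     return "\n".join(lines)
-- ===== SOURCE B (Python) =====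
-- _TOKENS = ["FG_API_KEY", "POSTGRES_PASSWORD", "NATS_AUTH_TOKEN", "FG_WEBHOOK_SECRET"]
--
--
-- def _redact_line(line: str) -> str:
--     # single left-to-right scan: at each position emit a redacted token or one char
--     out = []
--     i = 0
--     n = len(line)
--     while i < n:
--         for token in _TOKENS:
--             if line.startswith(token, i):
--                 out.append(token)
--                 out.append("=<redacted>")
--                 i += len(token)
--                 break
--         else:
--             out.append(line[i])
--             i += 1
--     return "".join(out)
--
--
-- def _sanitize_log(text: str) -> str:
--     return "\n".join(_redact_line(line) for line in text.splitlines())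
-- ===== Notes on version B (the rewrite author's own statement) =====
-- stated objective: alternative
-- what changed: B replaces A's per-line sequence of four membership-tests-plus-whole-line str.replace passes by a single left-to-right scan of each line that matches a token at each position and emits the redacted output in one pass.
import Mathlib
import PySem

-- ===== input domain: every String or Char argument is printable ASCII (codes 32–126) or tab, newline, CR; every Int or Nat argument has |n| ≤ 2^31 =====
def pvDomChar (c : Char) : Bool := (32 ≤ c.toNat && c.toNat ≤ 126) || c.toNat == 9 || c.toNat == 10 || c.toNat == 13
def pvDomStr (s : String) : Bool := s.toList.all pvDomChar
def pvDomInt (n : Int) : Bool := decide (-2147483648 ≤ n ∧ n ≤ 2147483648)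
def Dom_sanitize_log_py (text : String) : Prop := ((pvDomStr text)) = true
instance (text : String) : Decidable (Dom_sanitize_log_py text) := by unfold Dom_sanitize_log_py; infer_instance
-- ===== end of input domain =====

-- B replaces A's four sequential whole-line `replace` passes by one left-to-right scan per
-- line that matches a token at each position and emits the redacted output in a single pass
-- (objective: alternative — same observable behaviour, different algorithm).

-- ===== PORT A =====
def sanitize_log_py (text : String) : String :=
  let redaction_tokens : List String :=
    ["FG_API_KEY", "POSTGRES_PASSWORD", "NATS_AUTH_TOKEN", "FG_WEBHOOK_SECRET"]
  let lines : List String :=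
    (PySem.Str.splitlines text).foldl
      (fun lines line =>
        let sanitized :=
          redaction_tokens.foldl
            (fun sanitized token =>
              if PySem.Str.isIn token sanitized then
                PySem.Str.replace sanitized token (token ++ "=<redacted>")
              else sanitized)
            line
        lines ++ [sanitized])
      []
  PySem.Str.join "\n" lines

-- ===== PORT B =====
-- B-side helpers: the four token literals and the redaction suffix, as char lists
def pvT1 : List Char := "FG_API_KEY".toList
def pvT2 : List Char := "POSTGRES_PASSWORD".toList
def pvT3 : List Char := "NATS_AUTH_TOKEN".toList
def pvT4 : List Char := "FG_WEBHOOK_SECRET".toList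
def pvRed : List Char := "=<redacted>".toList

-- one left-to-right scan over the line: at each position emit a redacted token or one char
def redactGo : List Char → List Char
  | [] => []
  | c :: t =>
    if pvT1.isPrefixOf (c :: t) then pvT1 ++ pvRed ++ redactGo (t.drop 9)
    else if pvT2.isPrefixOf (c :: t) then pvT2 ++ pvRed ++ redactGo (t.drop 16)
    else if pvT3.isPrefixOf (c :: t) then pvT3 ++ pvRed ++ redactGo (t.drop 14)
    else if pvT4.isPrefixOf (c :: t) then pvT4 ++ pvRed ++ redactGo (t.drop 16)
    else c :: redactGo t
  termination_by l => l.length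
  decreasing_by all_goals simp [List.length_drop]

def sanitize_log_py_alt (text : String) : String :=
  PySem.Str.join "\n"
    ((PySem.Str.splitlines text).map (fun line => String.ofList (redactGo line.toList)))

-- ===== PRECONDITION & SPEC =====
def Spec_sanitize_log_py (text : String) (out : String) : Prop := out = sanitize_log_py_alt text
instance (text : String) (out : String) : Decidable (Spec_sanitize_log_py text out) := by unfold Spec_sanitize_log_py; infer_instance

-- ===== CLAIM (what is proved, stated in full; the proofs are below) =====
def Claim_equal_sanitize_log_py : Prop := ∀ (text : String), Dom_sanitize_log_py text → Spec_sanitize_log_py text (sanitize_log_py text)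

-- ===== LEMMAS AND PROOFS =====

-- clean model of Python's str.replace for a nonempty pattern (proof-side helper;
-- the `max … 1` only serves termination and equals old.length whenever old ≠ [])
def pvRep (old new : List Char) : List Char → List Char
  | [] => []
  | c :: t =>
    if old.isPrefixOf (c :: t) then new ++ pvRep old new ((c :: t).drop (max old.length 1))
    else c :: pvRep old new t
  termination_by l => l.length
  decreasing_by all_goals simp [List.length_drop]

@[simp] lemma pvRep_nil (old new : List Char) : pvRep old new [] = [] := by
  simp [pvRep]

lemma pvRep_match (old new l : List Char) (hold : old ≠ []) (h : old <+: l) :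
    pvRep old new l = new ++ pvRep old new (l.drop old.length) := by
  have hl : l ≠ [] := by
    rintro rfl; exact hold (List.prefix_nil.mp h)
  obtain ⟨c, t, rfl⟩ := List.exists_cons_of_ne_nil hl
  have hpos : 0 < old.length := List.length_pos_of_ne_nil hold
  have hmax : max old.length 1 = old.length := by omega
  rw [pvRep, if_pos (List.isPrefixOf_iff_prefix.mpr h), hmax]

lemma pvRep_nomatch (old new : List Char) (c : Char) (t : List Char)
    (h : ¬ old <+: (c :: t)) : pvRep old new (c :: t) = c :: pvRep old new t := by
  rw [pvRep, if_neg (fun hb => h (List.isPrefixOf_iff_prefix.mp hb))]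

-- Python replace's fuelled worker equals the model
lemma pvGo_eq (old new : List Char) (hold : old ≠ []) :
    ∀ (fuel : Nat) (l acc : List Char), l.length ≤ fuel →
      PySem.Chars.replace.go old new fuel l acc = acc.reverse ++ pvRep old new l := by
  intro fuel
  induction fuel with
  | zero =>
    intro l acc h
    have : l = [] := List.eq_nil_of_length_eq_zero (Nat.le_zero.mp h)
    subst this
    simp [PySem.Chars.replace.go]
  | succ f ih =>
    intro l acc h
    cases l with
    | nil => simp [PySem.Chars.replace.go]
    | cons c t =>
      have hpos : 0 < old.length := List.length_pos_of_ne_nil hold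
      simp only [PySem.Chars.replace.go]
      split
      case isTrue hp =>
        have hpre : old <+: (c :: t) := List.isPrefixOf_iff_prefix.mp hp
        have hlen : ((c :: t).drop old.length).length ≤ f := by
          simp only [List.length_drop, List.length_cons]
          simp only [List.length_cons] at h
          omega
        rw [ih _ _ hlen, pvRep_match old new _ hold hpre]
        simp
      case isFalse hp =>
        have hnp : ¬ old <+: (c :: t) :=
          fun hb => hp (List.isPrefixOf_iff_prefix.mpr hb)
        have hlen : t.length ≤ f := by
          simp only [List.length_cons] at h; omega
        rw [ih _ _ hlen, pvRep_nomatch old new c t hnp]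
        simp

lemma pvReplace_eq (old new l : List Char) (hold : old ≠ []) :
    PySem.Chars.replace l old new = pvRep old new l := by
  rw [PySem.Chars.replace, if_neg (by simp [hold])]
  simpa using pvGo_eq old new hold l.length l [] (le_refl _)

-- a prefix of an append is a prefix of the left part or extends it
lemma pvPrefix_cases {t B x : List Char} (h : t <+: B ++ x) : t <+: B ∨ B <+: t := by
  rcases h with ⟨r, hr⟩
  rcases List.append_eq_append_iff.mp hr.symm with ⟨a, ha, _⟩ | ⟨a, ha, _⟩
  · exact Or.inr ⟨a, ha.symm⟩
  · exact Or.inl ⟨a, ha.symm⟩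

-- `t` can neither match inside `B` nor start inside `B`
def pvBar (B t : List Char) : Prop :=
  ∀ k ∈ List.range B.length, ¬ t <+: B.drop k ∧ ¬ B.drop k <+: t

lemma pvRep_append (t n : List Char) :
    ∀ (B x : List Char), pvBar B t → pvRep t n (B ++ x) = B ++ pvRep t n x := by
  intro B
  induction B with
  | nil => intro x _; simp
  | cons c B' ih =>
    intro x hb
    have h0 := hb 0 (by simp)
    simp only [List.drop_zero] at h0
    have hnp : ¬ t <+: (c :: B') ++ x := by
      intro hp
      rcases pvPrefix_cases hp with h | h
      · exact h0.1 h
      · exact h0.2 h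
    have hb' : pvBar B' t := by
      intro k hk
      have hk' : k < B'.length := List.mem_range.mp hk
      have := hb (k + 1) (List.mem_range.mpr (by simp only [List.length_cons]; omega))
      simpa using this
    rw [List.cons_append, pvRep_nomatch t n c (B' ++ x) hnp, ih x hb']
    simp

lemma pvRep_no_occ (t n : List Char) :
    ∀ l, ¬ t <:+: l → pvRep t n l = l := by
  intro l
  induction l with
  | nil => intro _; simp
  | cons c l' ih =>
    intro h
    have h1 : ¬ t <+: (c :: l') := fun hp => h hp.isInfix
    have h2 : ¬ t <:+: l' := fun hi => h (List.infix_cons hi)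
    rw [pvRep_nomatch t n c l' h1, ih h2]

-- "agrees with x up to the first difference, which (if any) is an '=' in y"
def pvAgr (y x : List Char) : Prop :=
  y = x ∨ ∃ m, y.take m = x.take m ∧ y[m]? = some '='

lemma pvAgr_cons {y x : List Char} (c : Char) (h : pvAgr y x) : pvAgr (c :: y) (c :: x) := by
  rcases h with rfl | ⟨m, h1, h2⟩
  · exact Or.inl rfl
  · exact Or.inr ⟨m + 1, by simp [h1], by simpa using h2⟩

lemma pvAgr_trans {z y x : List Char} (h1 : pvAgr z y) (h2 : pvAgr y x) : pvAgr z x := by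
  rcases h1 with rfl | ⟨m1, a1, b1⟩
  · exact h2
  rcases h2 with rfl | ⟨m2, a2, b2⟩
  · exact Or.inr ⟨m1, a1, b1⟩
  by_cases hm : m1 ≤ m2
  · refine Or.inr ⟨m1, ?_, b1⟩
    calc z.take m1 = y.take m1 := a1
      _ = (y.take m2).take m1 := by rw [List.take_take, Nat.min_eq_left hm]
      _ = (x.take m2).take m1 := by rw [a2]
      _ = x.take m1 := by rw [List.take_take, Nat.min_eq_left hm]
  · have hm' : m2 < m1 := by omega
    refine Or.inr ⟨m2, ?_, ?_⟩
    · calc z.take m2 = (z.take m1).take m2 := by rw [List.take_take, Nat.min_eq_left (le_of_lt hm')]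
        _ = (y.take m1).take m2 := by rw [a1]
        _ = y.take m2 := by rw [List.take_take, Nat.min_eq_left (le_of_lt hm')]
        _ = x.take m2 := a2
    · calc z[m2]? = (z.take m1)[m2]? := (List.getElem?_take_of_lt hm').symm
        _ = (y.take m1)[m2]? := by rw [a1]
        _ = y[m2]? := List.getElem?_take_of_lt hm'
        _ = some '=' := b2

-- one replace pass only changes the line from an inserted '=' onwards
lemma pvRep_agr (t n w : List Char) (ht : t ≠ []) (hn : n = t ++ '=' :: w) :
    ∀ l, pvAgr (pvRep t n l) l := by
  intro l
  induction l with
  | nil => exact Or.inl (by simp)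
  | cons c t' ih =>
    by_cases hp : t <+: (c :: t')
    · rw [pvRep_match t n _ ht hp]
      refine Or.inr ⟨t.length, ?_, ?_⟩
      · obtain ⟨r, hr⟩ := hp
        rw [hn, List.append_assoc, List.take_left, ← hr, List.take_left]
      · rw [hn, List.append_assoc]
        simp
    · rw [pvRep_nomatch t n c t' hp]
      exact pvAgr_cons c ih

-- an '='-free token that did not match the original head cannot match the rewritten head
lemma pvNoPre {t0 : List Char} (hne : ('=' : Char) ∉ t0) {a : Char} {x y : List Char}
    (hagr : pvAgr y x) (hnp : ¬ t0 <+: a :: x) : ¬ t0 <+: a :: y := by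
  intro hp
  rcases hagr with rfl | ⟨m, ha, hb⟩
  · exact hnp hp
  by_cases hlen : t0.length ≤ m + 1
  · apply hnp
    have h1 : t0 <+: (a :: y).take (m + 1) := List.prefix_take_iff.mpr ⟨hp, hlen⟩
    have h2 : (a :: y).take (m + 1) = (a :: x).take (m + 1) := by
      simp [List.take_succ_cons, ha]
    exact (h2 ▸ h1).trans (List.take_prefix _ _)
  · have hm : m + 1 < t0.length := by omega
    have hg : t0[m + 1]? = (a :: y)[m + 1]? := by
      rcases hp with ⟨r, hr⟩
      rw [← hr, List.getElem?_append_left hm]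
    have : t0[m + 1]? = some '=' := by
      rw [hg, List.getElem?_cons_succ, hb]
    exact hne (List.mem_of_getElem? this)

-- the twelve separation facts between the concrete tokens / redacted blocks
def pvN1 : List Char := pvT1 ++ pvRed
def pvN2 : List Char := pvT2 ++ pvRed
def pvN3 : List Char := pvT3 ++ pvRed
def pvN4 : List Char := pvT4 ++ pvRed

lemma pvBar_N1_T2 : pvBar pvN1 pvT2 := by unfold pvBar; decide
lemma pvBar_N1_T3 : pvBar pvN1 pvT3 := by unfold pvBar; decide
lemma pvBar_N1_T4 : pvBar pvN1 pvT4 := by unfold pvBar; decide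
lemma pvBar_T2_T1 : pvBar pvT2 pvT1 := by unfold pvBar; decide
lemma pvBar_N2_T3 : pvBar pvN2 pvT3 := by unfold pvBar; decide
lemma pvBar_N2_T4 : pvBar pvN2 pvT4 := by unfold pvBar; decide
lemma pvBar_T3_T1 : pvBar pvT3 pvT1 := by unfold pvBar; decide
lemma pvBar_T3_T2 : pvBar pvT3 pvT2 := by unfold pvBar; decide
lemma pvBar_N3_T4 : pvBar pvN3 pvT4 := by unfold pvBar; decide
lemma pvBar_T4_T1 : pvBar pvT4 pvT1 := by unfold pvBar; decide
lemma pvBar_T4_T2 : pvBar pvT4 pvT2 := by unfold pvBar; decide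
lemma pvBar_T4_T3 : pvBar pvT4 pvT3 := by unfold pvBar; decide

-- equation lemmas for the B-side scanner, phrased through prefixes and token lengths
lemma redactGo_eq1 {l : List Char} (h : pvT1 <+: l) :
    redactGo l = pvN1 ++ redactGo (l.drop pvT1.length) := by
  have hne : l ≠ [] := fun hnil => (by decide : pvT1 ≠ []) (List.prefix_nil.mp (hnil ▸ h))
  obtain ⟨c, t, rfl⟩ := List.exists_cons_of_ne_nil hne
  rw [redactGo, if_pos (List.isPrefixOf_iff_prefix.mpr h)]
  rw [pvN1, List.append_assoc]
  rfl

lemma redactGo_eq2 {l : List Char} (h1 : ¬ pvT1 <+: l) (h : pvT2 <+: l) :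
    redactGo l = pvN2 ++ redactGo (l.drop pvT2.length) := by
  have hne : l ≠ [] := fun hnil => (by decide : pvT2 ≠ []) (List.prefix_nil.mp (hnil ▸ h))
  obtain ⟨c, t, rfl⟩ := List.exists_cons_of_ne_nil hne
  rw [redactGo, if_neg (fun hb => h1 (List.isPrefixOf_iff_prefix.mp hb)),
    if_pos (List.isPrefixOf_iff_prefix.mpr h)]
  rw [pvN2, List.append_assoc]
  rfl

lemma redactGo_eq3 {l : List Char} (h1 : ¬ pvT1 <+: l) (h2 : ¬ pvT2 <+: l) (h : pvT3 <+: l) :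
    redactGo l = pvN3 ++ redactGo (l.drop pvT3.length) := by
  have hne : l ≠ [] := fun hnil => (by decide : pvT3 ≠ []) (List.prefix_nil.mp (hnil ▸ h))
  obtain ⟨c, t, rfl⟩ := List.exists_cons_of_ne_nil hne
  rw [redactGo, if_neg (fun hb => h1 (List.isPrefixOf_iff_prefix.mp hb)),
    if_neg (fun hb => h2 (List.isPrefixOf_iff_prefix.mp hb)),
    if_pos (List.isPrefixOf_iff_prefix.mpr h)]
  rw [pvN3, List.append_assoc]
  rfl

lemma redactGo_eq4 {l : List Char} (h1 : ¬ pvT1 <+: l) (h2 : ¬ pvT2 <+: l)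
    (h3 : ¬ pvT3 <+: l) (h : pvT4 <+: l) :
    redactGo l = pvN4 ++ redactGo (l.drop pvT4.length) := by
  have hne : l ≠ [] := fun hnil => (by decide : pvT4 ≠ []) (List.prefix_nil.mp (hnil ▸ h))
  obtain ⟨c, t, rfl⟩ := List.exists_cons_of_ne_nil hne
  rw [redactGo, if_neg (fun hb => h1 (List.isPrefixOf_iff_prefix.mp hb)),
    if_neg (fun hb => h2 (List.isPrefixOf_iff_prefix.mp hb)),
    if_neg (fun hb => h3 (List.isPrefixOf_iff_prefix.mp hb)),
    if_pos (List.isPrefixOf_iff_prefix.mpr h)]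
  rw [pvN4, List.append_assoc]
  rfl

lemma redactGo_nomatch {c : Char} {t : List Char} (h1 : ¬ pvT1 <+: (c :: t))
    (h2 : ¬ pvT2 <+: (c :: t)) (h3 : ¬ pvT3 <+: (c :: t)) (h4 : ¬ pvT4 <+: (c :: t)) :
    redactGo (c :: t) = c :: redactGo t := by
  rw [redactGo, if_neg (fun hb => h1 (List.isPrefixOf_iff_prefix.mp hb)),
    if_neg (fun hb => h2 (List.isPrefixOf_iff_prefix.mp hb)),
    if_neg (fun hb => h3 (List.isPrefixOf_iff_prefix.mp hb)),
    if_neg (fun hb => h4 (List.isPrefixOf_iff_prefix.mp hb))]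

-- MAIN LEMMA: the four sequential replace passes equal the single scan
lemma pvChain : ∀ l : List Char,
    pvRep pvT4 pvN4 (pvRep pvT3 pvN3 (pvRep pvT2 pvN2 (pvRep pvT1 pvN1 l))) = redactGo l := by
  have key : ∀ N : Nat, ∀ l : List Char, l.length ≤ N →
      pvRep pvT4 pvN4 (pvRep pvT3 pvN3 (pvRep pvT2 pvN2 (pvRep pvT1 pvN1 l))) = redactGo l := by
    intro N
    induction N with
    | zero =>
      intro l hl
      have : l = [] := List.eq_nil_of_length_eq_zero (Nat.le_zero.mp hl)
      subst this
      simp [redactGo]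
    | succ N ih =>
      intro l hl
      by_cases h1 : pvT1 <+: l
      · have hlen : (l.drop pvT1.length).length ≤ N := by
          have := h1.length_le
          have h10 : pvT1.length = 10 := by decide
          simp only [List.length_drop]
          omega
        rw [pvRep_match pvT1 pvN1 l (by decide) h1,
          pvRep_append pvT2 pvN2 pvN1 _ pvBar_N1_T2,
          pvRep_append pvT3 pvN3 pvN1 _ pvBar_N1_T3,
          pvRep_append pvT4 pvN4 pvN1 _ pvBar_N1_T4,
          ih _ hlen, redactGo_eq1 h1]
      · by_cases h2 : pvT2 <+: l
        · have hlen : (l.drop pvT2.length).length ≤ N := by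
            have := h2.length_le
            have h17 : pvT2.length = 17 := by decide
            simp only [List.length_drop]
            omega
          obtain ⟨u, hu⟩ := h2
          rw [← hu, pvRep_append pvT1 pvN1 pvT2 _ pvBar_T2_T1,
            pvRep_match pvT2 pvN2 _ (by decide) (List.prefix_append _ _),
            List.drop_left,
            pvRep_append pvT3 pvN3 pvN2 _ pvBar_N2_T3,
            pvRep_append pvT4 pvN4 pvN2 _ pvBar_N2_T4]
          have hu' : u = l.drop pvT2.length := by rw [← hu, List.drop_left]
          rw [hu, redactGo_eq2 h1 ⟨u, hu⟩, ← hu']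
          rw [hu', ih _ hlen]
        · by_cases h3 : pvT3 <+: l
          · have hlen : (l.drop pvT3.length).length ≤ N := by
              have := h3.length_le
              have h15 : pvT3.length = 15 := by decide
              simp only [List.length_drop]
              omega
            obtain ⟨u, hu⟩ := h3
            rw [← hu, pvRep_append pvT1 pvN1 pvT3 _ pvBar_T3_T1,
              pvRep_append pvT2 pvN2 pvT3 _ pvBar_T3_T2,
              pvRep_match pvT3 pvN3 _ (by decide) (List.prefix_append _ _),
              List.drop_left,
              pvRep_append pvT4 pvN4 pvN3 _ pvBar_N3_T4]
            have hu' : u = l.drop pvT3.length := by rw [← hu, List.drop_left]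
            rw [hu, redactGo_eq3 h1 h2 ⟨u, hu⟩, ← hu']
            rw [hu', ih _ hlen]
          · by_cases h4 : pvT4 <+: l
            · have hlen : (l.drop pvT4.length).length ≤ N := by
                have := h4.length_le
                have h17 : pvT4.length = 17 := by decide
                simp only [List.length_drop]
                omega
              obtain ⟨u, hu⟩ := h4
              rw [← hu, pvRep_append pvT1 pvN1 pvT4 _ pvBar_T4_T1,
                pvRep_append pvT2 pvN2 pvT4 _ pvBar_T4_T2,
                pvRep_append pvT3 pvN3 pvT4 _ pvBar_T4_T3,
                pvRep_match pvT4 pvN4 _ (by decide) (List.prefix_append _ _),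
                List.drop_left]
              have hu' : u = l.drop pvT4.length := by rw [← hu, List.drop_left]
              rw [hu, redactGo_eq4 h1 h2 h3 ⟨u, hu⟩, ← hu']
              rw [hu', ih _ hlen]
            · cases l with
              | nil => simp [redactGo]
              | cons c t =>
                have hlt : t.length ≤ N := by
                  simp only [List.length_cons] at hl; omega
                have e1 := pvRep_nomatch pvT1 pvN1 c t h1
                have a1 : pvAgr (pvRep pvT1 pvN1 t) t :=
                  pvRep_agr pvT1 pvN1 "<redacted>".toList (by decide) (by decide) t
                have h2' : ¬ pvT2 <+: c :: pvRep pvT1 pvN1 t :=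
                  pvNoPre (by decide) a1 h2
                have e2 := pvRep_nomatch pvT2 pvN2 c _ h2'
                have a2 : pvAgr (pvRep pvT2 pvN2 (pvRep pvT1 pvN1 t)) t :=
                  pvAgr_trans
                    (pvRep_agr pvT2 pvN2 "<redacted>".toList (by decide) (by decide) _) a1
                have h3' : ¬ pvT3 <+: c :: pvRep pvT2 pvN2 (pvRep pvT1 pvN1 t) :=
                  pvNoPre (by decide) a2 h3
                have e3 := pvRep_nomatch pvT3 pvN3 c _ h3'
                have a3 : pvAgr (pvRep pvT3 pvN3 (pvRep pvT2 pvN2 (pvRep pvT1 pvN1 t))) t :=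
                  pvAgr_trans
                    (pvRep_agr pvT3 pvN3 "<redacted>".toList (by decide) (by decide) _) a2
                have h4' : ¬ pvT4 <+: c :: pvRep pvT3 pvN3 (pvRep pvT2 pvN2 (pvRep pvT1 pvN1 t)) :=
                  pvNoPre (by decide) a3 h4
                have e4 := pvRep_nomatch pvT4 pvN4 c _ h4'
                rw [e1, e2, e3, e4, redactGo_nomatch h1 h2 h3 h4, ih t hlt]
  intro l
  exact key l.length l (le_refl _)

-- the `if token in s` guard around replace is redundant
lemma pvStrIf (s old new : String) (h : old.toList ≠ []) :
    (if PySem.Str.isIn old s then PySem.Str.replace s old new else s)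
      = PySem.Str.replace s old new := by
  split
  · rfl
  · rename_i hni
    have hfalse : PySem.Chars.isIn old.toList s.toList = false := by
      cases hb : PySem.Chars.isIn old.toList s.toList
      · rfl
      · exact absurd (by simpa using hb) hni
    have hninf : ¬ old.toList <:+: s.toList := (PySem.Chars.isIn_eq_false_iff _ _).mp hfalse
    rw [PySem.Str.replace, pvReplace_eq _ _ _ h, pvRep_no_occ _ _ _ hninf,
      String.ofList_toList]

-- A's per-line body equals B's per-line scan
lemma pvStrRep (x o n : String) (ho : o.toList ≠ []) :
    PySem.Str.replace x o n = String.ofList (pvRep o.toList n.toList x.toList) := by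
  rw [PySem.Str.replace, pvReplace_eq _ _ _ ho]

set_option maxHeartbeats 1000000 in
lemma pvLine (s : String) :
    (["FG_API_KEY", "POSTGRES_PASSWORD", "NATS_AUTH_TOKEN", "FG_WEBHOOK_SECRET"] : List String).foldl
      (fun sanitized token =>
        if PySem.Str.isIn token sanitized then
          PySem.Str.replace sanitized token (token ++ "=<redacted>")
        else sanitized) s
      = String.ofList (redactGo s.toList) := by
  simp only [List.foldl_cons, List.foldl_nil]
  rw [pvStrIf _ _ _ (by decide), pvStrIf _ _ _ (by decide), pvStrIf _ _ _ (by decide),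
    pvStrIf _ _ _ (by decide),
    pvStrRep _ _ _ (by decide), pvStrRep _ _ _ (by decide), pvStrRep _ _ _ (by decide),
    pvStrRep _ _ _ (by decide)]
  simp only [String.toList_ofList, String.toList_append]
  exact congrArg String.ofList (pvChain s.toList)

-- ===== VERDICT (by name: the statement is the Claim_ definition above) =====
theorem sanitize_log_py_spec : Claim_equal_sanitize_log_py := by
  intro text _
  show sanitize_log_py text = sanitize_log_py_alt text
  unfold sanitize_log_py sanitize_log_py_alt
  dsimp only
  rw [PySem.List.foldl_append_singleton_eq_map]
  simp only [List.nil_append]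
  rw [List.map_congr_left (fun line _ => pvLine line)]
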